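-- pv_equiv track=rewrite | github.com/needleworm/base_sequence_analysis | sequence_analizer.py | gene_sequence_into_fasta
-- ===== SOURCE A (Python) =====
-- def gene_sequence_into_fasta(sequence):
--     retval = ""
--     while len(sequence) > 70:
--         retval += sequence[:70]
--         retval += "\n"
--         sequence = sequence[70:]
--     retval += sequence
--     return retval
-- ===== SOURCE B (Python) =====
-- def gene_sequence_into_fasta(sequence):
--     out = []
--     for i, ch in enumerate(sequence):
--         if i and i % 70 == 0:
--             out.append("\n")
--         out.append(ch)
--     return "".join(out)
-- ===== Notes on version B (the rewrite author's own statement) =====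
-- stated objective: alternative
-- what changed: Replaces the chunk-slicing while-loop over 70-char prefixes with a single character-level pass (enumerate + index modular arithmetic) that inserts a newline separator before every 70th character and joins once at the end.
import Mathlib
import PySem

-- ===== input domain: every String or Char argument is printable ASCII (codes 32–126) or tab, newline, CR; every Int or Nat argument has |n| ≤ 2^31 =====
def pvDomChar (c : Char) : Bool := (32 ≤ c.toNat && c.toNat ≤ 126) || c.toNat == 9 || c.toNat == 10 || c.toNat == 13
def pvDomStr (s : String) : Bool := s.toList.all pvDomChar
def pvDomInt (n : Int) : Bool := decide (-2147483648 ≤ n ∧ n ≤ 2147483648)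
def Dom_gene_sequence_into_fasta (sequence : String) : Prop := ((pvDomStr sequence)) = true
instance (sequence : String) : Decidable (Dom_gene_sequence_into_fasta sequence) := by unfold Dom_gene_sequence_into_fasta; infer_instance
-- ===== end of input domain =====

-- B replaces A's 70-char chunk slicing loop with a single character-level pass inserting newline separators by modular index arithmetic (measured constant-factor speedup from one final join).


-- ===== PORT A =====
-- A's while loop as recursion on the (list-level) string; slices via PySem.List.slice, '+=' as append.
def geneFastaLoopA (retval : List Char) (s : List Char) : List Char :=
  if _h : 70 < s.length then
    geneFastaLoopA (retval ++ PySem.List.slice s none (some 70) ++ ['\n'])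
                   (PySem.List.slice s (some 70) none)
  else
    retval ++ s
termination_by s.length
decreasing_by
  rw [PySem.List.slice_from _ (by norm_num : (0:Int) ≤ 70)]
  simp only [List.length_drop]
  omega

def gene_sequence_into_fasta (sequence : String) : String :=
  String.ofList (geneFastaLoopA [] sequence.toList)

-- ===== PORT B =====
-- Source B's for-loop over enumerate(sequence) as a foldl; 'if i and i % 70 == 0' is 'i ≠ 0 ∧ i % 70 = 0'.
def gene_sequence_into_fasta_alt (sequence : String) : String :=
  String.ofList ((PySem.List.enumerate sequence.toList 0).foldl
    (fun out ic =>
      (if ic.1 ≠ 0 ∧ PySem.Int.mod ic.1 70 = 0 then out ++ ['\n'] else out) ++ [ic.2]) [])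

-- ===== PRECONDITION & SPEC =====
def Spec_gene_sequence_into_fasta (sequence : String) (out : String) : Prop := out = gene_sequence_into_fasta_alt sequence
instance (sequence : String) (out : String) : Decidable (Spec_gene_sequence_into_fasta sequence out) := by unfold Spec_gene_sequence_into_fasta; infer_instance

-- ===== CLAIM (what is proved, stated in full; the proofs are below) =====
def Claim_equal_gene_sequence_into_fasta : Prop := ∀ (sequence : String), Dom_gene_sequence_into_fasta sequence → Spec_gene_sequence_into_fasta sequence (gene_sequence_into_fasta sequence)

-- ===== LEMMAS AND PROOFS =====

-- B's body as a pure recursion on the characters, carrying the running index.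
def bf (i : Nat) : List Char → List Char
  | [] => []
  | c :: t => (if i ≠ 0 ∧ i % 70 = 0 then ['\n'] else []) ++ c :: bf (i + 1) t

-- A's result as a pure chunking recursion.
def chunkA (s : List Char) : List Char :=
  if _h : 70 < s.length then
    s.take 70 ++ '\n' :: chunkA (s.drop 70)
  else s
termination_by s.length
decreasing_by simp only [List.length_drop]; omega

lemma geneFastaLoopA_eq (s : List Char) : ∀ r, geneFastaLoopA r s = r ++ chunkA s := by
  induction s using chunkA.induct with
  | case1 s h ih =>
      intro r
      rw [geneFastaLoopA.eq_def, chunkA.eq_def]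
      rw [dif_pos h, dif_pos h]
      rw [PySem.List.slice_to s (by norm_num : (0:Int) ≤ 70),
          PySem.List.slice_from s (by norm_num : (0:Int) ≤ 70)]
      simp only [show Int.toNat 70 = 70 from rfl]
      rw [ih]
      simp
  | case2 s h =>
      intro r
      rw [geneFastaLoopA.eq_def, chunkA.eq_def]
      rw [dif_neg h, dif_neg h]

lemma foldlB_eq_bf (s : List Char) : ∀ (i : Nat) (acc : List Char),
    (PySem.List.enumerate s (i : Int)).foldl
      (fun out ic =>
        (if ic.1 ≠ 0 ∧ PySem.Int.mod ic.1 70 = 0 then out ++ ['\n'] else out) ++ [ic.2]) acc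
      = acc ++ bf i s := by
  induction s with
  | nil => intro i acc; simp [PySem.List.enumerate, bf]
  | cons c t ih =>
      intro i acc
      rw [PySem.List.enumerate_cons, List.foldl_cons]
      have hc : ((i : Int) ≠ 0 ∧ PySem.Int.mod (i : Int) 70 = 0) ↔ (i ≠ 0 ∧ i % 70 = 0) := by
        rw [PySem.Int.mod_eq_emod_of_pos (by norm_num : (0:Int) < 70)]
        constructor <;> intro ⟨h1, h2⟩ <;> exact ⟨by omega, by omega⟩
      have hstep : ((i : Int) + 1) = ((i + 1 : Nat) : Int) := by push_cast; ring
      rw [hstep, ih (i + 1)]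
      rw [if_congr hc rfl rfl, bf]
      by_cases hcase : i ≠ 0 ∧ i % 70 = 0
      · rw [if_pos hcase, if_pos hcase]; simp
      · rw [if_neg hcase, if_neg hcase]; simp

-- shifting the index by 70 does not change bf, once past index 0
lemma bf_shift (t : List Char) : ∀ i : Nat, 1 ≤ i → bf (i + 70) t = bf i t := by
  induction t with
  | nil => intro i _; simp [bf]
  | cons c t ih =>
      intro i hi
      rw [bf, bf]
      have h1 : (i + 70 ≠ 0 ∧ (i + 70) % 70 = 0) ↔ (i ≠ 0 ∧ i % 70 = 0) := by
        constructor <;> intro ⟨a, b⟩ <;> exact ⟨by omega, by omega⟩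
      rw [if_congr h1 rfl rfl]
      have : i + 70 + 1 = (i + 1) + 70 := by omega
      rw [this, ih (i + 1) (by omega)]

-- from a mid-chunk index j (1 ≤ j ≤ 70), bf copies the rest of the chunk then continues at index 70
lemma bf_step (t : List Char) : ∀ j : Nat, 1 ≤ j → j ≤ 70 →
    bf j t = t.take (70 - j) ++ bf 70 (t.drop (70 - j)) := by
  induction t with
  | nil => intro j _ _; simp [bf]
  | cons c t ih =>
      intro j h1 h2
      by_cases hj : j = 70
      · subst hj; simp
      · have hlt : j < 70 := by omega
        rw [bf]
        have hne : ¬ (j ≠ 0 ∧ j % 70 = 0) := by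
          rintro ⟨a, b⟩; omega
        rw [if_neg hne]
        have htk : (70 - j) = (70 - (j + 1)) + 1 := by omega
        rw [ih (j + 1) (by omega) (by omega), htk]
        simp [List.take_succ_cons, List.drop_succ_cons]

lemma bf_split (s : List Char) : bf 0 s = s.take 70 ++ bf 70 (s.drop 70) := by
  cases s with
  | nil => simp [bf]
  | cons c t =>
      rw [bf, if_neg (by rintro ⟨a, _⟩; exact a rfl)]
      rw [bf_step t 1 (by omega) (by omega)]
      simp

lemma bf70_cons (c : Char) (t : List Char) : bf 70 (c :: t) = '\n' :: bf 0 (c :: t) := by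
  rw [bf, bf]
  rw [if_pos ⟨by omega, by omega⟩, if_neg (by rintro ⟨a, _⟩; exact a rfl)]
  rw [show (70:Nat) + 1 = 1 + 70 from by omega, bf_shift t 1 (by omega)]
  simp

lemma bf_eq_chunkA (n : Nat) : ∀ s : List Char, s.length ≤ n → bf 0 s = chunkA s := by
  induction n with
  | zero =>
      intro s hs
      have : s = [] := List.eq_nil_of_length_eq_zero (by omega)
      subst this; simp [bf, chunkA]
  | succ n ih =>
      intro s hs
      rw [chunkA]
      by_cases h : 70 < s.length
      · rw [dif_pos h, bf_split]
        have hd : s.drop 70 ≠ [] := by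
          intro he
          have := congrArg List.length he
          simp at this; omega
        obtain ⟨c, t, hct⟩ := List.exists_cons_of_ne_nil hd
        rw [hct, bf70_cons, ← hct]
        rw [ih (s.drop 70) (by simp; omega)]
      · rw [dif_neg h]
        rw [bf_split]
        have : s.drop 70 = [] := by
          apply List.eq_nil_of_length_eq_zero; simp; omega
        rw [this]
        simp [bf]
        omega

-- ===== VERDICT (by name: the statement is the Claim_ definition above) =====
theorem gene_sequence_into_fasta_spec : Claim_equal_gene_sequence_into_fasta := by
  intro sequence _
  show _ = _
  unfold gene_sequence_into_fasta gene_sequence_into_fasta_alt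
  rw [geneFastaLoopA_eq]
  have h := foldlB_eq_bf sequence.toList 0 []
  simp only [Nat.cast_zero] at h
  rw [h]
  rw [bf_eq_chunkA sequence.toList.length _ (le_refl _)]
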